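-- pv_equiv track=rewrite | github.com/riglr/riglr | docs/generate_docs.py | extract_doc_comments
-- ===== SOURCE A (Python) =====
-- from typing import List, Dict, Optional, Tuple
--
-- def extract_doc_comments(lines: List[str], start_idx: int) -> str:
--     """Extract documentation comments above a function."""
--     docs = []
--     idx = start_idx - 1
--
--     while idx >= 0:
--         line = lines[idx].strip()
--         if line.startswith('///'):
--             # Extract doc comment content
--             doc_line = line[3:].strip()
--             docs.insert(0, doc_line)
--         elif line.startswith('//'):
--             # Regular comment, skip
--             pass
--         elif not line:
--             # Empty line, continue
--             pass
--         else:
--             # Not a comment, stop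
--             break
--         idx -= 1
--
--     return '\n'.join(docs)
-- ===== SOURCE B (Python) =====
-- def extract_doc_comments(lines, start_idx):
--     """Extract documentation comments above a function (single forward pass)."""
--     docs = []
--     for idx in range(start_idx):
--         line = lines[idx].strip()
--         if line.startswith('///'):
--             docs.append(line[3:].strip())
--         elif line.startswith('//') or not line:
--             pass
--         else:
--             docs = []
--     return '\n'.join(docs)
-- ===== Notes on version B (the rewrite author's own statement) =====
-- stated objective: alternative
-- what changed: Replaces A's backward while-loop with break and docs.insert(0,...) by a single forward pass over range(start_idx) that appends and resets the accumulator on a non-comment line.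
import Mathlib
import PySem

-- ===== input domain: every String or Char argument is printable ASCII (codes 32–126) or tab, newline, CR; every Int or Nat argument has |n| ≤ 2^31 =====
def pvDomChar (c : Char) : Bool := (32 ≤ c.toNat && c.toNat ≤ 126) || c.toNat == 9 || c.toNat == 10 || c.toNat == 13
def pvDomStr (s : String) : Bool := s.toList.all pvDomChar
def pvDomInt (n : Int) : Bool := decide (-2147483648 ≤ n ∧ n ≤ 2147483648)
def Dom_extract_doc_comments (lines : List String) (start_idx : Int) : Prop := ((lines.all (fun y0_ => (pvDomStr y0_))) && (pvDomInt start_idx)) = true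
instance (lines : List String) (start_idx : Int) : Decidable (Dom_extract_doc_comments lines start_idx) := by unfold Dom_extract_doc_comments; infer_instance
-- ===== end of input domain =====

-- ===== PORT A =====
-- while-loop of A: walk backward from idx, prepending extracted doc lines; stop on a code line
def pvALoop (lines : List String) (idx : Int) (docs : List String) : List String :=
  if 0 ≤ idx then
    match PySem.List.pyGet? lines idx with
    | none => docs  -- Python raises IndexError here; excluded by Pre_
    | some s =>
      let line := PySem.Str.strip s
      if PySem.Str.startswith line "///" then
        pvALoop lines (idx - 1) (PySem.Str.strip (PySem.Str.slice line (some 3) none) :: docs)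
      else if PySem.Str.startswith line "//" then
        pvALoop lines (idx - 1) docs
      else if line == "" then
        pvALoop lines (idx - 1) docs
      else docs
  else docs
termination_by (idx + 1).toNat
decreasing_by all_goals (simp_wf; omega)

def extract_doc_comments (lines : List String) (start_idx : Int) : String :=
  PySem.Str.join "\n" (pvALoop lines (start_idx - 1) [])

-- ===== PORT B =====
-- loop body of B: append a doc line, skip comments/blanks, reset on a code line
def pvBStep (lines : List String) (docs : List String) (idx : Int) : List String :=
  let line := PySem.Str.strip (PySem.List.pyGetD lines idx "")
  if PySem.Str.startswith line "///" then
    docs ++ [PySem.Str.strip (PySem.Str.slice line (some 3) none)]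
  else if PySem.Str.startswith line "//" || line == "" then docs
  else []

def extract_doc_comments_alt (lines : List String) (start_idx : Int) : String :=
  PySem.Str.join "\n" ((PySem.List.pyRange 0 start_idx 1).foldl (pvBStep lines) [])

-- ===== PRECONDITION & SPEC =====
-- A raises IndexError (lines[start_idx - 1]) when start_idx > len(lines); exactly those inputs are excluded.
def Pre_extract_doc_comments (lines : List String) (start_idx : Int) : Prop :=
  start_idx ≤ (lines.length : Int)
instance (lines : List String) (start_idx : Int) : Decidable (Pre_extract_doc_comments lines start_idx) := by
  unfold Pre_extract_doc_comments; infer_instance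

def pvWitness_extract_doc_comments : List String × Int := (["/// Adds.", "fn add() {}"], 1)

def Spec_extract_doc_comments (lines : List String) (start_idx : Int) (out : String) : Prop := out = extract_doc_comments_alt lines start_idx
instance (lines : List String) (start_idx : Int) (out : String) : Decidable (Spec_extract_doc_comments lines start_idx out) := by
  unfold Spec_extract_doc_comments; infer_instance

-- ===== CLAIM (what is proved, stated in full; the proofs are below) =====
def Claim_equal_extract_doc_comments : Prop := ∀ (lines : List String) (start_idx : Int), Dom_extract_doc_comments lines start_idx → Pre_extract_doc_comments lines start_idx → Spec_extract_doc_comments lines start_idx (extract_doc_comments lines start_idx)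

-- ===== LEMMAS AND PROOFS =====
-- Invariant: A's backward loop started at index n-1 with accumulator docs equals
-- B's forward fold over the first n indices, followed by docs.
theorem pvALoop_eq_foldl (lines : List String) (n : Nat) (hn : n ≤ lines.length) (docs : List String) :
    pvALoop lines ((n : Int) - 1) docs =
      ((PySem.List.pyRange 0 (n : Int) 1).foldl (pvBStep lines) []) ++ docs := by
  induction n generalizing docs with
  | zero =>
    rw [pvALoop]
    simp [PySem.List.pyRange_one_eq_nil]
  | succ m ih =>
    have hm : m < lines.length := by omega
    have hget : PySem.List.pyGet? lines ((m : Int)) = some lines[m] := by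
      simp [PySem.List.pyGet?_natCast, List.getElem?_eq_getElem hm]
    have hgd : PySem.List.pyGetD lines ((m : Int)) "" = lines[m] := by
      simp [PySem.List.pyGetD_natCast, List.getElem?_eq_getElem hm]
    have hrange : PySem.List.pyRange 0 ((m : Int) + 1) 1 = PySem.List.pyRange 0 (m : Int) 1 ++ [(m : Int)] :=
      PySem.List.pyRange_one_succ_right (by exact_mod_cast Nat.zero_le m)
    push_cast
    rw [show (m : Int) + 1 - 1 = (m : Int) from by ring]
    rw [pvALoop, if_pos (show (0 : Int) ≤ (m : Int) by exact_mod_cast Nat.zero_le m), hget, hrange,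
        List.foldl_append, List.foldl_cons, List.foldl_nil]
    simp only []
    set F := List.foldl (pvBStep lines) ([] : List String) (PySem.List.pyRange 0 (m : Int) 1) with hF
    simp only [pvBStep, hgd]
    split_ifs <;> (try rw [ih (by omega)]) <;> simp_all

-- ===== VERDICT (by name: the statement is the Claim_ definition above) =====
theorem extract_doc_comments_spec : Claim_equal_extract_doc_comments := by
  intro lines start_idx _hdom hpre
  unfold Pre_extract_doc_comments at hpre
  unfold Spec_extract_doc_comments extract_doc_comments extract_doc_comments_alt
  by_cases hneg : start_idx ≤ 0
  · rw [pvALoop, if_neg (show ¬ (0 : Int) ≤ start_idx - 1 by omega), PySem.List.pyRange_one_eq_nil hneg]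
    rfl
  · obtain ⟨n, hn⟩ : ∃ n : Nat, start_idx = (n : Int) := ⟨start_idx.toNat, by omega⟩
    subst hn
    rw [pvALoop_eq_foldl lines n (by omega) []]
    simp
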